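-- pv_equiv track=rewrite | github.com/ThePhilgrim/mantatail | commands.py | parse_received_args
-- ===== SOURCE A (Python) =====
-- from typing import Optional, Dict, List, Tuple
--
-- def parse_received_args(msg: str) -> Tuple[str, List[str]]:
--     """
--     Parses the user command by separating the command (e.g "join", "privmsg", etc.) from the
--     arguments.
--
--     If a parameter contains spaces, it must start with ':' to be interpreted as one parameter.
--     If the parameter does not start with ':', it will be cut off at the first space.
--
--     Ex:
--         - "PRIVMSG #foo :This is a message\r\n" will send "This is a message"
--         - "PRIVMSG #foo This is a message\r\n" will send "This"
--     """
--     split_msg = msg.split(" ")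
--
--     for num, arg in enumerate(split_msg):
--         if arg.startswith(":"):
--             parsed_msg = split_msg[:num]
--             parsed_msg.append(" ".join(split_msg[num:])[1:])
--             command = parsed_msg[0]
--             return command, parsed_msg[1:]
--
--     command = split_msg[0]
--     return command, split_msg[1:]
-- ===== SOURCE B (Python) =====
-- def parse_received_args(msg):
--     """Separate the IRC command from its arguments via substring search
--     instead of a token scan: the first ':'-prefixed parameter starts right
--     after the first ' :' occurrence (or at position 0)."""
--     if msg.startswith(":"):
--         return msg[1:], []
--     head, sep, param = msg.partition(" :")
--     tokens = head.split(" ")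
--     if sep:
--         return tokens[0], tokens[1:] + [param]
--     return tokens[0], tokens[1:]
-- ===== Notes on version B (the rewrite author's own statement) =====
-- stated objective: idiomatic
-- what changed: Replaces the enumerate-tokens-and-scan loop (with slicing and re-joining at the hit index) by a direct substring search: a startswith(':') guard, then str.partition(' :') to split the message at the first ':'-prefixed parameter, splitting only the head.
import Mathlib
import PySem

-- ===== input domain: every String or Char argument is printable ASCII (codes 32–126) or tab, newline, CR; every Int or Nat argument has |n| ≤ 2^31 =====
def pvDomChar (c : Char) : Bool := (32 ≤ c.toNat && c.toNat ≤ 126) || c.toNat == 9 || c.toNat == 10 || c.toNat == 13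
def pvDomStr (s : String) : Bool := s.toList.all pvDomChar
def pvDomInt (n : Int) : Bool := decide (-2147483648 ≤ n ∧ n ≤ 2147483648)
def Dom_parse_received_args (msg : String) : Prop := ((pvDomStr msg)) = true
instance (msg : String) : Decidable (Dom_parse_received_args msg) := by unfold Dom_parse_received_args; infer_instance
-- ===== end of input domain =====

-- B replaces A's enumerate-and-scan over the split tokens by a substring search
-- (startswith-':' guard, then partition at the first " :"), splitting only the head: more idiomatic.

-- ===== PORT A =====
-- the 'for num, arg in enumerate(split_msg): …' loop with its early return;
-- split_msg[0] / parsed_msg[0] are ported as pyGetD with default "" — both lists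
-- are provably nonempty (str.split never returns []), so the default is never used
def pvLoopA (sm : List String) : List (Int × String) → String × List String
  | [] =>
      (PySem.List.pyGetD sm 0 "", PySem.List.slice sm (some 1) none)
  | (num, arg) :: rest =>
      if PySem.Str.startswith arg ":" then
        let parsed_msg := PySem.List.slice sm none (some num)
        let parsed_msg := parsed_msg ++
          [PySem.Str.slice (PySem.Str.join " " (PySem.List.slice sm (some num) none)) (some 1) none]
        (PySem.List.pyGetD parsed_msg 0 "", PySem.List.slice parsed_msg (some 1) none)
      else pvLoopA sm rest

def parse_received_args (msg : String) : String × List String :=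
  match PySem.Str.split? msg " " with
  | none => ("", [])   -- unreachable: the separator " " is nonempty
  | some split_msg => pvLoopA split_msg (PySem.List.enumerate split_msg)

-- ===== PORT B =====
-- msg.partition(" :") is ported by hand, exactly CPython's semantics: find the FIRST
-- occurrence of " :" (PySem.Str.find, -1 if absent); head = msg[:i], param = msg[i+2:]
def parse_received_args_alt (msg : String) : String × List String :=
  if PySem.Str.startswith msg ":" then
    (PySem.Str.slice msg (some 1) none, [])
  else
    let i := PySem.Str.find msg " :"
    if i = -1 then
      match PySem.Str.split? msg " " with
      | none => ("", [])   -- unreachable: the separator " " is nonempty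
      | some tokens => (PySem.List.pyGetD tokens 0 "", PySem.List.slice tokens (some 1) none)
    else
      let head := PySem.Str.slice msg none (some i)
      let param := PySem.Str.slice msg (some (i + 2)) none
      match PySem.Str.split? head " " with
      | none => ("", [])   -- unreachable: the separator " " is nonempty
      | some tokens =>
          (PySem.List.pyGetD tokens 0 "", PySem.List.slice tokens (some 1) none ++ [param])

-- ===== PRECONDITION & SPEC =====
def Spec_parse_received_args (msg : String) (out : String × List String) : Prop := out = parse_received_args_alt msg
instance (msg : String) (out : String × List String) : Decidable (Spec_parse_received_args msg out) := by unfold Spec_parse_received_args; infer_instance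

-- ===== CLAIM (what is proved, stated in full; the proofs are below) =====
def Claim_equal_parse_received_args : Prop := ∀ (msg : String), Dom_parse_received_args msg → Spec_parse_received_args msg (parse_received_args msg)

-- ===== LEMMAS AND PROOFS =====

-- structural characterization of Python's str.split(c) for a one-character separator
def sp (c : Char) : List Char → List (List Char)
  | [] => [[]]
  | d :: r =>
      if d = c then [] :: sp c r
      else
        match sp c r with
        | [] => [[d]]
        | t :: ts => (d :: t) :: ts

-- index of the first token starting with ':'
def fc : List (List Char) → Option Nat
  | [] => none
  | t :: ts => if PySem.Chars.startswith t [':'] then some 0 else (fc ts).map (· + 1)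

theorem sp_ne_nil (c : Char) (l : List Char) : sp c l ≠ [] := by
  cases l with
  | nil => simp [sp]
  | cons d r => simp only [sp]; split; · simp
                split <;> simp

theorem go_eq_sp (c : Char) (l : List Char) : ∀ (fuel : Nat) (cur : List Char) (acc : List (List Char)),
    l.length ≤ fuel →
    PySem.Chars.splitOn.go [c] fuel l cur acc =
      acc.reverse ++ (match sp c l with
        | [] => []
        | t :: ts => (cur.reverse ++ t) :: ts) := by
  induction l with
  | nil =>
    intro fuel cur acc _
    cases fuel <;> simp [PySem.Chars.splitOn.go, sp]
  | cons d r ih =>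
    intro fuel cur acc hf
    cases fuel with
    | zero => simp at hf
    | succ f =>
      rw [PySem.Chars.splitOn.go]
      by_cases hd : d = c
      · subst hd
        have hpre : [d].isPrefixOf (d :: r) = true := by simp [List.isPrefixOf]
        rw [if_pos hpre]
        simp only [List.length_cons] at hf
        simp only [List.length_cons, List.length_nil, List.drop_succ_cons, List.drop_zero]
        rw [ih f [] (cur.reverse :: acc) (by omega)]
        have := sp_ne_nil d r
        cases hsp : sp d r with
        | nil => exact absurd hsp this
        | cons t ts => simp [sp, hsp]
      · have hpre : [c].isPrefixOf (d :: r) = false := by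
          simp [List.isPrefixOf]
          intro h; exact absurd h.symm hd
        rw [if_neg (by simp [hpre])]
        simp only [List.length_cons] at hf
        rw [ih f (d :: cur) acc (by omega)]
        have := sp_ne_nil c r
        cases hsp : sp c r with
        | nil => exact absurd hsp this
        | cons t ts => simp [sp, hsp, hd]

theorem splitOn_eq_sp (c : Char) (l : List Char) : PySem.Chars.splitOn l [c] = sp c l := by
  rw [PySem.Chars.splitOn, go_eq_sp c l (l.length + 1) [] [] (by omega)]
  have := sp_ne_nil c l
  cases hsp : sp c l with
  | nil => exact absurd hsp this
  | cons t ts => simp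

theorem join_sp (c : Char) (l : List Char) : PySem.Chars.join [c] (sp c l) = l := by
  induction l with
  | nil => simp [sp, PySem.Chars.join_singleton]
  | cons d r ih =>
    simp only [sp]
    by_cases hd : d = c
    · subst hd
      rw [if_pos rfl]
      have := sp_ne_nil d r
      cases hsp : sp d r with
      | nil => exact absurd hsp this
      | cons t ts =>
        rw [hsp] at ih
        rw [PySem.Chars.join_cons_cons]
        simp [← ih]
    · rw [if_neg hd]
      have := sp_ne_nil c r
      cases hsp : sp c r with
      | nil => exact absurd hsp this
      | cons t ts =>
        rw [hsp] at ih
        cases ts with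
        | nil =>
          rw [PySem.Chars.join_singleton]
          rw [PySem.Chars.join_singleton] at ih
          rw [ih]
        | cons u ts' =>
          rw [PySem.Chars.join_cons_cons]
          rw [PySem.Chars.join_cons_cons] at ih
          simp only [List.cons_append, List.append_assoc] at *
          rw [ih]

theorem sp_space_free (c : Char) (l : List Char) : ∀ t ∈ sp c l, c ∉ t := by
  induction l with
  | nil => simp [sp]
  | cons d r ih =>
    simp only [sp]
    by_cases hd : d = c
    · subst hd
      rw [if_pos rfl]
      intro t ht
      simp only [List.mem_cons] at ht
      rcases ht with h | h
      · simp [h]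
      · exact ih t h
    · rw [if_neg hd]
      have := sp_ne_nil c r
      cases hsp : sp c r with
      | nil => exact absurd hsp this
      | cons t ts =>
        intro u hu
        simp only [List.mem_cons] at hu
        rcases hu with h | h
        · subst h
          intro hmem
          simp only [List.mem_cons] at hmem
          rcases hmem with h | h
          · exact hd h.symm
          · exact ih t (by simp [hsp]) h
        · exact ih u (by simp [hsp, h])

theorem sp_no_sep (c : Char) (a : List Char) (h : c ∉ a) : sp c a = [a] := by
  induction a with
  | nil => simp [sp]
  | cons d r ih =>
    simp only [List.mem_cons, not_or] at h
    simp only [sp]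
    rw [if_neg (fun hh => h.1 hh.symm), ih h.2]

theorem sp_append (c : Char) (a r : List Char) (h : c ∉ a) : sp c (a ++ c :: r) = a :: sp c r := by
  induction a with
  | nil => simp [sp]
  | cons d a' ih =>
    simp only [List.mem_cons, not_or] at h
    simp only [List.cons_append, sp]
    rw [if_neg (fun hh => h.1 hh.symm), ih h.2]

theorem sp_join (c : Char) (ts : List (List Char)) : ∀ (x : List Char), c ∉ x → (∀ t ∈ ts, c ∉ t) →
    sp c (PySem.Chars.join [c] (x :: ts)) = x :: ts := by
  induction ts with
  | nil =>
    intro x hx _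
    rw [PySem.Chars.join_singleton, sp_no_sep c x hx]
  | cons u ts' ih =>
    intro x hx hts
    rw [PySem.Chars.join_cons_cons]
    have : x ++ [c] ++ PySem.Chars.join [c] (u :: ts') = x ++ c :: PySem.Chars.join [c] (u :: ts') := by
      simp
    rw [this, sp_append c x _ hx, ih u (hts u (by simp)) (fun t ht => hts t (by simp [ht]))]

theorem join_append_cons (c : Char) (xs : List (List Char)) : ∀ (x y : List Char) (ys : List (List Char)),
    PySem.Chars.join [c] (x :: xs ++ y :: ys) =
      PySem.Chars.join [c] (x :: xs) ++ c :: PySem.Chars.join [c] (y :: ys) := by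
  induction xs with
  | nil =>
    intro x y ys
    rw [List.singleton_append, PySem.Chars.join_cons_cons, PySem.Chars.join_singleton]
    simp
  | cons u xs' ih =>
    intro x y ys
    have := ih u y ys
    simp only [List.cons_append] at this ⊢
    rw [PySem.Chars.join_cons_cons, this, PySem.Chars.join_cons_cons]
    simp

theorem startswith_join (c : Char) (hc : c ≠ ':') (u : List Char) (ts : List (List Char)) :
    PySem.Chars.startswith (PySem.Chars.join [c] (u :: ts)) [':'] = PySem.Chars.startswith u [':'] := by
  cases ts with
  | nil => rw [PySem.Chars.join_singleton]
  | cons v ts' =>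
    rw [PySem.Chars.join_cons_cons]
    cases u with
    | nil =>
      simp only [PySem.Chars.startswith, List.nil_append, List.cons_append, List.isPrefixOf]
      simp
      exact fun h => hc h.symm
    | cons a u' => simp [PySem.Chars.startswith, List.isPrefixOf]

theorem find_go_nil (sub : List Char) (k : Nat) :
    PySem.Chars.find.go sub [] k = if sub.isEmpty then (k : Int) else -1 := by
  rw [PySem.Chars.find.go]

theorem find_go_cons (sub : List Char) (a : Char) (l : List Char) (k : Nat) :
    PySem.Chars.find.go sub (a :: l) k =
      if sub.isPrefixOf (a :: l) then (k : Int) else PySem.Chars.find.go sub l (k + 1) := by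
  rw [PySem.Chars.find.go]

theorem find_go_shift (sub : List Char) (l : List Char) : ∀ (k : Nat),
    PySem.Chars.find.go sub l k =
      if PySem.Chars.find.go sub l 0 = -1 then -1 else PySem.Chars.find.go sub l 0 + k := by
  induction l with
  | nil =>
    intro k
    rw [find_go_nil, find_go_nil]
    by_cases h : sub.isEmpty <;> simp [h]
  | cons a l ih =>
    intro k
    rw [find_go_cons, find_go_cons]
    by_cases h : sub.isPrefixOf (a :: l)
    · simp [h]
    · rw [if_neg h, if_neg h, ih (k + 1), ih 1]
      by_cases h0 : PySem.Chars.find.go sub l 0 = -1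
      · simp [h0]
      · have hnn : -1 ≤ PySem.Chars.find.go sub l 0 := by
          have := PySem.Chars.neg_one_le_find l sub
          rwa [PySem.Chars.find] at this
        rw [if_neg h0, if_neg (by omega), if_neg h0]
        push_cast
        ring

theorem find_no_space (t : List Char) (h : (' ' : Char) ∉ t) : PySem.Chars.find t [' ', ':'] = -1 := by
  rw [PySem.Chars.find_eq_neg_one_iff]
  intro hinf
  exact h (hinf.subset (by simp))

theorem find_go_boundary (t : List Char) (h : (' ' : Char) ∉ t) : ∀ (r : List Char) (k : Nat),
    PySem.Chars.find.go [' ', ':'] (t ++ ' ' :: r) k =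
      if PySem.Chars.startswith r [':'] then (k : Int) + t.length
      else if PySem.Chars.find r [' ', ':'] = -1 then -1
      else PySem.Chars.find r [' ', ':'] + (k + t.length + 1) := by
  induction t with
  | nil =>
    intro r k
    rw [List.nil_append, find_go_cons]
    have hpre : [' ', ':'].isPrefixOf (' ' :: r) = PySem.Chars.startswith r [':'] := by
      cases r with
      | nil => simp [List.isPrefixOf, PySem.Chars.startswith]
      | cons b r' => simp [List.isPrefixOf, PySem.Chars.startswith]
    rw [hpre]
    by_cases hs : PySem.Chars.startswith r [':']
    · simp [hs]
    · rw [if_neg hs, if_neg hs]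
      rw [PySem.Chars.find, find_go_shift [' ', ':'] r (k + 1)]
      by_cases h0 : PySem.Chars.find.go [' ', ':'] r 0 = -1
      · simp [h0]
      · rw [if_neg h0, if_neg h0]
        simp only [List.length_nil]
        push_cast
        ring
  | cons a t' ih =>
    intro r k
    simp only [List.mem_cons, not_or] at h
    rw [List.cons_append, find_go_cons]
    have hpre : [' ', ':'].isPrefixOf (a :: (t' ++ ' ' :: r)) = false := by
      simp [List.isPrefixOf]
      intro hh
      exact absurd hh h.1
    rw [hpre]
    simp only [Bool.false_eq_true, if_false]
    rw [ih h.2 r (k + 1)]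
    by_cases hs : PySem.Chars.startswith r [':']
    · rw [if_pos hs, if_pos hs]
      simp only [List.length_cons]
      push_cast
      ring
    · rw [if_neg hs, if_neg hs]
      by_cases h0 : PySem.Chars.find r [' ', ':'] = -1
      · simp [h0]
      · rw [if_neg h0, if_neg h0]
        simp only [List.length_cons]
        push_cast
        ring

theorem find_boundary (t r : List Char) (h : (' ' : Char) ∉ t) :
    PySem.Chars.find (t ++ ' ' :: r) [' ', ':'] =
      if PySem.Chars.startswith r [':'] then (t.length : Int)
      else if PySem.Chars.find r [' ', ':'] = -1 then -1
      else PySem.Chars.find r [' ', ':'] + (t.length + 1) := by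
  rw [PySem.Chars.find, find_go_boundary t h r 0]
  by_cases hs : PySem.Chars.startswith r [':']
  · simp [hs]
  · rw [if_neg hs, if_neg hs]
    by_cases h0 : PySem.Chars.find r [' ', ':'] = -1
    · simp [h0]
    · rw [if_neg h0, if_neg h0]
      push_cast
      ring

theorem find_join (ts : List (List Char)) : ∀ (t : List Char), (' ' : Char) ∉ t → (∀ u ∈ ts, (' ' : Char) ∉ u) →
    PySem.Chars.find (PySem.Chars.join [' '] (t :: ts)) [' ', ':'] =
      match fc ts with
      | none => -1
      | some k => ((PySem.Chars.join [' '] (t :: ts.take k)).length : Int) := by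
  induction ts with
  | nil =>
    intro t ht _
    rw [PySem.Chars.join_singleton, find_no_space t ht]
    rfl
  | cons u ts' ih =>
    intro t ht hts
    rw [PySem.Chars.join_cons_cons]
    have hrw : t ++ [' '] ++ PySem.Chars.join [' '] (u :: ts') = t ++ ' ' :: PySem.Chars.join [' '] (u :: ts') := by
      simp
    rw [hrw, find_boundary t _ ht]
    rw [startswith_join ' ' (by decide) u ts']
    by_cases hu : PySem.Chars.startswith u [':']
    · rw [if_pos hu]
      simp only [fc, hu, if_pos]
      rw [List.take_zero, PySem.Chars.join_singleton]
    · rw [if_neg hu]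
      rw [ih u (hts u (by simp)) (fun v hv => hts v (by simp [hv]))]
      simp only [fc, hu, Bool.false_eq_true, if_false]
      cases hfc : fc ts' with
      | none => simp
      | some k =>
        simp only [Option.map_some]
        rw [if_neg (show ¬((PySem.Chars.join [' '] (u :: ts'.take k)).length : Int) = -1 by omega)]
        have htake : (u :: ts').take (k + 1) = u :: ts'.take k := by simp
        rw [htake, PySem.Chars.join_cons_cons]
        simp only [List.length_append, List.length_cons, List.length_nil]
        push_cast
        ring

theorem fc_none (ts : List (List Char)) (h : fc ts = none) :
    ∀ u ∈ ts, PySem.Chars.startswith u [':'] = false := by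
  induction ts with
  | nil => simp
  | cons t ts' ih =>
    simp only [fc] at h
    by_cases ht : PySem.Chars.startswith t [':']
    · simp [ht] at h
    · intro u hu
      simp only [ht, Bool.false_eq_true, if_false, Option.map_eq_none_iff] at h
      rcases List.mem_cons.mp hu with rfl | hu'
      · simpa using ht
      · exact ih h u hu'

theorem fc_some (ts : List (List Char)) : ∀ (k : Nat), fc ts = some k →
    ∃ pre u rest, ts = pre ++ u :: rest ∧ pre.length = k ∧
      PySem.Chars.startswith u [':'] = true ∧ ∀ p ∈ pre, PySem.Chars.startswith p [':'] = false := by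
  induction ts with
  | nil => intro k h; simp [fc] at h
  | cons t ts' ih =>
    intro k h
    simp only [fc] at h
    by_cases ht : PySem.Chars.startswith t [':']
    · simp only [ht, if_pos] at h
      obtain rfl : (0 : Nat) = k := by simpa using h
      exact ⟨[], t, ts', by simp, rfl, ht, by simp⟩
    · simp only [ht, Bool.false_eq_true, if_false] at h
      cases hfc : fc ts' with
      | none => rw [hfc] at h; simp at h
      | some j =>
        rw [hfc] at h
        simp only [Option.map_some, Option.some.injEq] at h
        obtain ⟨pre, u, rest, hts, hlen, hu, hpre⟩ := ih j hfc
        refine ⟨t :: pre, u, rest, by simp [hts], by simp [hlen, ← h], hu, ?_⟩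
        intro p hp
        rcases List.mem_cons.mp hp with rfl | hp'
        · simpa using ht
        · exact hpre p hp'

theorem loopA_skip (sm : List String) (pre : List String)
    (h : ∀ x ∈ pre, PySem.Str.startswith x ":" = false) : ∀ (rest : List String) (k : Int),
    pvLoopA sm (PySem.List.enumerate (pre ++ rest) k) =
      pvLoopA sm (PySem.List.enumerate rest (k + pre.length)) := by
  induction pre with
  | nil => intro rest k; simp
  | cons p pre' ih =>
    intro rest k
    rw [List.cons_append, PySem.List.enumerate_cons]
    have hp : PySem.Str.startswith p ":" = false := h p (by simp)
    simp only [pvLoopA, hp, Bool.false_eq_true, if_false]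
    rw [ih (fun x hx => h x (by simp [hx])) rest (k + 1)]
    simp only [List.length_cons]
    push_cast
    ring_nf

theorem loopA_fire (sm : List String) (arg : String) (more : List String) (k : Int)
    (h : PySem.Str.startswith arg ":" = true) :
    pvLoopA sm (PySem.List.enumerate (arg :: more) k) =
      (PySem.List.pyGetD (PySem.List.slice sm none (some k) ++
          [PySem.Str.slice (PySem.Str.join " " (PySem.List.slice sm (some k) none)) (some 1) none]) 0 "",
       PySem.List.slice (PySem.List.slice sm none (some k) ++
          [PySem.Str.slice (PySem.Str.join " " (PySem.List.slice sm (some k) none)) (some 1) none]) (some 1) none) := by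
  rw [PySem.List.enumerate_cons]
  have h' : PySem.Chars.startswith arg.toList [':'] = true := by
    have := PySem.Str.startswith_eq arg ":"
    rw [h] at this
    exact this.symm
  simp [pvLoopA, h']

theorem string_eq_of_toList {s t : String} (h : s.toList = t.toList) : s = t :=
  String.toList_inj.mp h


theorem pyGetD_cons_zero {α : Type} (x : α) (l : List α) (d : α) :
    PySem.List.pyGetD (x :: l) 0 d = x := by
  simp [pysem]

theorem slice_one_cons {α : Type} (x : α) (l : List α) :
    PySem.List.slice (x :: l) (some 1) none = l := by
  rw [PySem.List.slice_from _ (show (0:Int) ≤ 1 by omega)]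
  rfl

theorem split_sp (s : String) :
    ∃ sm, PySem.Str.split? s " " = some sm ∧ sm.map String.toList = sp ' ' s.toList := by
  have h := PySem.Str.split?_map s " "
  have hsep : (" ".toList) = [' '] := by decide
  rw [hsep] at h
  cases hs : PySem.Str.split? s " " with
  | none => rw [hs] at h; simp [PySem.Chars.split?] at h
  | some sm =>
    refine ⟨sm, rfl, ?_⟩
    rw [hs] at h
    simp only [Option.map_some, PySem.Chars.split?, List.isEmpty_cons, Bool.false_eq_true,
      if_false, Option.some.injEq] at h
    rw [h, splitOn_eq_sp]

theorem loopA_fire_nat (sm : List String) (arg : String) (more : List String) (n : Nat)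
    (h : PySem.Str.startswith arg ":" = true) :
    pvLoopA sm (PySem.List.enumerate (arg :: more) ((n : Nat) : Int)) =
      (PySem.List.pyGetD (sm.take n ++
          [PySem.Str.slice (PySem.Str.join " " (sm.drop n)) (some 1) none]) 0 "",
       PySem.List.slice (sm.take n ++
          [PySem.Str.slice (PySem.Str.join " " (sm.drop n)) (some 1) none]) (some 1) none) := by
  rw [loopA_fire sm arg more _ h]
  rw [PySem.List.slice_to sm (show (0:Int) ≤ (n:Int) by omega)]
  rw [PySem.List.slice_from sm (show (0:Int) ≤ (n:Int) by omega)]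
  simp

theorem parse_AB (msg : String) : parse_received_args msg = parse_received_args_alt msg := by
  obtain ⟨sm, hsml, hmap⟩ := split_sp msg
  have hcs := join_sp ' ' msg.toList
  have hsf := sp_space_free ' ' msg.toList
  obtain ⟨t, ts, hsp⟩ : ∃ t ts, sp ' ' msg.toList = t :: ts := by
    cases h : sp ' ' msg.toList with
    | nil => exact absurd h (sp_ne_nil _ _)
    | cons a b => exact ⟨a, b, rfl⟩
  have hcol : (":".toList) = [':'] := by decide
  have hstart : PySem.Chars.startswith msg.toList [':'] = PySem.Chars.startswith t [':'] := by
    conv_lhs => rw [← hcs, hsp]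
    exact startswith_join ' ' (by decide) t ts
  have hmsgstart : PySem.Str.startswith msg ":" = PySem.Chars.startswith t [':'] := by
    rw [PySem.Str.startswith_eq, hcol, hstart]
  have htmem : t ∈ sp ' ' msg.toList := by rw [hsp]; simp
  have htsmem : ∀ u ∈ ts, u ∈ sp ' ' msg.toList := by intro u hu; rw [hsp]; simp [hu]
  simp only [parse_received_args, hsml]
  by_cases hT : PySem.Chars.startswith t [':'] = true
  · -- first token starts with ':' — the loop fires at index 0
    cases sm with
    | nil =>
      simp only [List.map_nil] at hmap
      exact absurd hmap.symm (sp_ne_nil ' ' msg.toList)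
    | cons s0 sm' =>
      have h0 : PySem.Str.startswith s0 ":" = true := by
        rw [PySem.Str.startswith_eq, hcol]
        have : s0.toList = t := by
          have := congrArg (fun l => l.headD []) hmap
          simpa [hsp] using this
        rw [this]; exact hT
      have hfire := loopA_fire_nat (s0 :: sm') s0 sm' 0 h0
      simp only [Nat.cast_zero] at hfire
      rw [hfire]
      rw [parse_received_args_alt.eq_def]
      rw [if_pos (by rw [hmsgstart]; exact hT)]
      simp only [List.take_zero, List.drop_zero, List.nil_append]
      refine Prod.ext ?_ ?_
      · show PySem.List.pyGetD [PySem.Str.slice (PySem.Str.join " " (s0 :: sm')) (some 1) none] 0 "" =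
          PySem.Str.slice msg (some 1) none
        have hjoin : (PySem.Str.join " " (s0 :: sm')).toList = msg.toList := by
          rw [PySem.Str.toList_join]
          have : (" ".toList) = [' '] := by decide
          rw [this, hmap, hcs]
        apply string_eq_of_toList
        simp [pysem, hjoin]
      · simp [pysem]
  · -- first token does not start with ':'
    have hTf : PySem.Chars.startswith t [':'] = false := by simpa using hT
    have hfind : PySem.Str.find msg " :" = PySem.Chars.find msg.toList [' ', ':'] := by
      rw [PySem.Str.find_eq]
      have : (" :".toList) = [' ', ':'] := by decide
      rw [this]
    have hfj : PySem.Chars.find msg.toList [' ', ':'] =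
        match fc ts with
        | none => -1
        | some k => ((PySem.Chars.join [' '] (t :: ts.take k)).length : Int) := by
      conv_lhs => rw [← hcs, hsp]
      exact find_join ts t (hsf t htmem) (fun u hu => hsf u (htsmem u hu))
    rw [parse_received_args_alt.eq_def]
    rw [if_neg (by rw [hmsgstart, hTf]; simp)]
    simp only []
    cases hfc : fc ts with
    | none =>
      rw [hfc] at hfj
      simp only at hfj
      rw [if_pos (by rw [hfind, hfj]), hsml]
      have hall : ∀ x ∈ sm, PySem.Str.startswith x ":" = false := by
        intro x hx
        rw [PySem.Str.startswith_eq, hcol]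
        have hxl : x.toList ∈ t :: ts := by
          rw [← hsp, ← hmap]; exact List.mem_map_of_mem hx
        rcases List.mem_cons.mp hxl with h | h
        · rw [h]; exact hTf
        · exact fc_none ts hfc x.toList h
      have hskip := loopA_skip sm sm hall [] 0
      simp only [List.append_nil] at hskip
      rw [hskip, PySem.List.enumerate_nil]
      rfl
    | some k =>
      rw [hfc] at hfj
      simp only at hfj
      obtain ⟨pre, u, rest, hts, hlen, hu, hpre⟩ := fc_some ts k hfc
      have htake : ts.take k = pre := by rw [hts, ← hlen, List.take_left]
      rw [htake] at hfj
      have hL0 : ((PySem.Chars.join [' '] (t :: pre)).length : Int) ≠ -1 := by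
        intro hEq
        have hge : (0:Int) ≤ ((PySem.Chars.join [' '] (t :: pre)).length : Int) := Int.natCast_nonneg _
        omega
      rw [if_neg (by rw [hfind, hfj]; exact hL0)]
      -- decompose msg
      have hdecomp : msg.toList =
          PySem.Chars.join [' '] (t :: pre) ++ ' ' :: PySem.Chars.join [' '] (u :: rest) := by
        conv_lhs => rw [← hcs, hsp, hts]
        rw [show t :: (pre ++ u :: rest) = (t :: pre) ++ u :: rest from by simp]
        exact join_append_cons ' ' pre t u rest
      have hi : PySem.Str.find msg " :" = ((PySem.Chars.join [' '] (t :: pre)).length : Int) := by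
        rw [hfind, hfj]
      have hlensm : sm.length = ts.length + 1 := by
        have := congrArg List.length hmap
        simp only [List.length_map, hsp, List.length_cons] at this
        exact this
      have hlents : ts.length = k + (rest.length + 1) := by
        rw [hts]; simp [hlen]
      -- the first k+1 tokens (as strings) and the rest
      have hmapA : (sm.take (k + 1)).map String.toList = t :: pre := by
        rw [List.map_take, hmap, hsp, hts, List.take_succ_cons, ← hlen, List.take_left]
      have hmapB : (sm.drop (k + 1)).map String.toList = u :: rest := by
        rw [List.map_drop, hmap, hsp, hts, List.drop_succ_cons, ← hlen, List.drop_left]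
      have hAll : ∀ x ∈ sm.take (k + 1), PySem.Str.startswith x ":" = false := by
        intro x hx
        rw [PySem.Str.startswith_eq, hcol]
        have hxl : x.toList ∈ t :: pre := by
          rw [← hmapA]; exact List.mem_map_of_mem hx
        rcases List.mem_cons.mp hxl with h | h
        · rw [h]; exact hTf
        · exact hpre x.toList h
      obtain ⟨sb0, smB', hB⟩ : ∃ sb0 smB', sm.drop (k + 1) = sb0 :: smB' := by
        cases hb : sm.drop (k + 1) with
        | nil => rw [hb] at hmapB; simp at hmapB
        | cons a b => exact ⟨a, b, rfl⟩
      have hsb0 : PySem.Str.startswith sb0 ":" = true := by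
        rw [PySem.Str.startswith_eq, hcol]
        have hmapB' := hmapB
        rw [hB] at hmapB'
        simp only [List.map_cons, List.cons.injEq] at hmapB'
        rw [hmapB'.1]; exact hu
      obtain ⟨sa0, smA', hA⟩ : ∃ sa0 smA', sm.take (k + 1) = sa0 :: smA' := by
        cases ha : sm.take (k + 1) with
        | nil => rw [ha] at hmapA; simp at hmapA
        | cons a b => exact ⟨a, b, rfl⟩
      -- A's value
      have hlent : (sm.take (k + 1)).length = k + 1 := by
        rw [List.length_take]; omega
      have hAval : pvLoopA sm (PySem.List.enumerate sm) =
          (PySem.List.pyGetD (sm.take (k + 1) ++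
              [PySem.Str.slice (PySem.Str.join " " (sm.drop (k + 1))) (some 1) none]) 0 "",
           PySem.List.slice (sm.take (k + 1) ++
              [PySem.Str.slice (PySem.Str.join " " (sm.drop (k + 1))) (some 1) none]) (some 1) none) := by
        have hskip := loopA_skip sm (sm.take (k + 1)) hAll (sm.drop (k + 1)) 0
        rw [List.take_append_drop] at hskip
        rw [hskip, hlent, hB, zero_add, loopA_fire_nat sm sb0 smB' (k + 1) hsb0]
        rw [← hB]
      rw [hAval]
      -- B's value
      rw [hi]
      obtain ⟨smh, hsmh, hmaph⟩ := split_sp (PySem.Str.slice msg none (some ((PySem.Chars.join [' '] (t :: pre)).length : Int)))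
      rw [hsmh]
      have hheadl : (PySem.Str.slice msg none (some ((PySem.Chars.join [' '] (t :: pre)).length : Int))).toList
          = PySem.Chars.join [' '] (t :: pre) := by
        rw [PySem.Str.toList_slice]
        have : PySem.Chars.slice msg.toList none (some ((PySem.Chars.join [' '] (t :: pre)).length : Int))
            = msg.toList.take ((PySem.Chars.join [' '] (t :: pre)).length : Int).toNat :=
          PySem.List.slice_to msg.toList (Int.natCast_nonneg _)
        rw [this, Int.toNat_natCast, hdecomp, List.take_left]
      have hsmh_eq : smh = sm.take (k + 1) := by
        have hinj : Function.Injective String.toList := fun a b h => String.toList_inj.mp h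
        apply List.map_injective_iff.mpr hinj
        rw [hmaph, hheadl, hmapA]
        exact sp_join ' ' pre t (hsf t htmem) (fun p hp => hsf p (htsmem p (by rw [hts]; simp [hp])))
      rw [hsmh_eq, hA]
      -- the trailing parameter agrees
      have hparam : PySem.Str.slice (PySem.Str.join " " (sm.drop (k + 1))) (some 1) none =
          PySem.Str.slice msg (some (((PySem.Chars.join [' '] (t :: pre)).length : Int) + 2)) none := by
        apply string_eq_of_toList
        rw [PySem.Str.toList_slice, PySem.Str.toList_slice, PySem.Str.toList_join]
        have hsepl : (" ".toList) = [' '] := by decide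
        rw [hsepl, hmapB]
        simp only [PySem.Chars.slice]
        rw [PySem.List.slice_from _ (show (0:Int) ≤ 1 by omega)]
        rw [PySem.List.slice_from _ (show (0:Int) ≤ ((PySem.Chars.join [' '] (t :: pre)).length : Int) + 2 by positivity)]
        have h2 : (((PySem.Chars.join [' '] (t :: pre)).length : Int) + 2).toNat
            = (PySem.Chars.join [' '] (t :: pre)).length + 2 := by
          generalize (PySem.Chars.join [' '] (t :: pre)).length = L
          omega
        rw [h2, hdecomp, List.drop_length_add_append 2]
        rfl
      rw [hparam]
      simp only [List.cons_append, pyGetD_cons_zero, slice_one_cons]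


-- ===== VERDICT (by name: the statement is the Claim_ definition above) =====
theorem parse_received_args_spec : Claim_equal_parse_received_args := by
  intro msg _
  unfold Spec_parse_received_args
  exact parse_AB msg
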